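-- pv_equiv track=rewrite | github.com/shirayukikitsune/python-code | src/main/lp/treinamento_4/different_digits/main.py | has_repeated_digits
-- ===== SOURCE A (Python) =====
-- def has_repeated_digits(num):
--     digits = [False] * 10
--     while num > 0:
--         digit = num % 10
--         if digits[digit]:
--             return True
--         digits[digit] = True
--         num = num // 10
--
--     return False
-- ===== SOURCE B (Python) =====
-- def has_repeated_digits(num):
--     for d in range(10):
--         count = 0
--         n = num
--         while n > 0:
--             if n % 10 == d:
--                 count += 1
--             n //= 10
--         if count >= 2:
--             return True
--     return False
-- ===== Notes on version B (the rewrite author's own statement) =====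
-- stated objective: alternative
-- what changed: Replaces the single digit-extraction pass that marks seen digits in a boolean table with a ten-pass brute force: for each digit value 0-9 it re-scans the whole number counting occurrences of that value and reports a repeat when some count reaches 2, keeping no seen-set at all.
import Mathlib
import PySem

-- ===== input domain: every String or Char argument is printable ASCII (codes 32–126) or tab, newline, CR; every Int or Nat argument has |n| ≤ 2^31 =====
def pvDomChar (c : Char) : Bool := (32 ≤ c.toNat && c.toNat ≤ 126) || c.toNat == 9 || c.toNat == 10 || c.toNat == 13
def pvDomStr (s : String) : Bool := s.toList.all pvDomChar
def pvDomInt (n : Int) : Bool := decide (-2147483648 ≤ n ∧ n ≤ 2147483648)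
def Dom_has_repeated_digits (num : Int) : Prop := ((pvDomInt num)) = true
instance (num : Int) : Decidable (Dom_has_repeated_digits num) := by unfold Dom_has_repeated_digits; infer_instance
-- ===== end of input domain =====

-- B replaces A's single marking pass (boolean table of seen digits, early return) with a ten-pass
-- brute force: for each digit value 0-9 it re-scans the number counting that value and reports a
-- repeat when a count reaches 2 (objective: alternative, same result, no seen-set kept).

lemma pvFloordiv10_toNat_lt (num : Int) (h : num > 0) :
    (PySem.Int.floordiv num 10).toNat < num.toNat := by
  rw [PySem.Int.floordiv_eq_ediv_of_pos (by omega : (0:Int) < 10)]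
  omega

-- ===== PORT A =====
-- the while-loop of A: state is (num, digits); the index 'digit' is always in range 0..9,
-- so the total indexing forms pyGetD/pySetD are exact here
def hrdLoop (num : Int) (digits : List Bool) : Bool :=
  if h : num > 0 then
    let digit := PySem.Int.mod num 10
    if PySem.List.pyGetD digits digit false then true
    else hrdLoop (PySem.Int.floordiv num 10) (PySem.List.pySetD digits digit true)
  else false
termination_by num.toNat
decreasing_by exact pvFloordiv10_toNat_lt num h

def has_repeated_digits (num : Int) : Bool :=
  hrdLoop num (List.replicate 10 false)

-- ===== PORT B =====
-- the inner while-loop of B: counts how many digits of n equal d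
def cntLoop (n d count : Int) : Int :=
  if h : n > 0 then
    cntLoop (PySem.Int.floordiv n 10) d
      (if PySem.Int.mod n 10 = d then count + 1 else count)
  else count
termination_by n.toNat
decreasing_by exact pvFloordiv10_toNat_lt n h

-- the outer for-loop of B over range(10), with the early 'return True'
def altOuter (num : Int) : List Int → Bool
  | [] => false
  | d :: ds => if cntLoop num d 0 ≥ 2 then true else altOuter num ds

def has_repeated_digits_alt (num : Int) : Bool :=
  altOuter num (PySem.List.pyRange 0 10 1)

-- ===== PRECONDITION & SPEC =====
def Spec_has_repeated_digits (num : Int) (out : Bool) : Prop := out = has_repeated_digits_alt num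
instance (num : Int) (out : Bool) : Decidable (Spec_has_repeated_digits num out) := by unfold Spec_has_repeated_digits; infer_instance

-- ===== CLAIM (what is proved, stated in full; the proofs are below) =====
def Claim_equal_has_repeated_digits : Prop := ∀ (num : Int), Dom_has_repeated_digits num → Spec_has_repeated_digits num (has_repeated_digits num)

-- ===== LEMMAS AND PROOFS =====

-- proof-only helper: the digit list of num (least significant first)
def digitsLoop (num : Int) (acc : List Int) : List Int :=
  if h : num > 0 then
    digitsLoop (PySem.Int.floordiv num 10) (acc ++ [PySem.Int.mod num 10])
  else acc
termination_by num.toNat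
decreasing_by exact pvFloordiv10_toNat_lt num h

lemma digitsLoop_append : ∀ (n : ℕ) (num : Int), num.toNat = n →
    ∀ (acc : List Int), digitsLoop num acc = acc ++ digitsLoop num [] := by
  intro n
  induction n using Nat.strong_induction_on with
  | _ n ih =>
    intro num hn acc
    by_cases h : num > 0
    · rw [digitsLoop]
      conv_rhs => rw [digitsLoop]
      simp only [h, dif_pos]
      rw [ih _ (hn ▸ pvFloordiv10_toNat_lt num h) _ rfl]
      simp only [List.nil_append]
      rw [ih _ (hn ▸ pvFloordiv10_toNat_lt num h) _ rfl ([PySem.Int.mod num 10])]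
      simp
    · rw [digitsLoop]
      conv_rhs => rw [digitsLoop]
      simp [h]

lemma digitsLoop_nil_pos (num : Int) (h : num > 0) :
    digitsLoop num [] =
      PySem.Int.mod num 10 :: digitsLoop (PySem.Int.floordiv num 10) [] := by
  rw [digitsLoop]
  simp only [h, dif_pos, List.nil_append]
  rw [digitsLoop_append _ _ rfl]
  simp

lemma digitsLoop_nil_nonpos (num : Int) (h : ¬ num > 0) : digitsLoop num [] = [] := by
  rw [digitsLoop]; simp [h]

lemma mem_digitsLoop_nil : ∀ (n : ℕ) (num : Int), num.toNat = n →
    ∀ d ∈ digitsLoop num [], 0 ≤ d ∧ d < 10 := by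
  intro n
  induction n using Nat.strong_induction_on with
  | _ n ih =>
    intro num hn d hd
    by_cases h : num > 0
    · rw [digitsLoop_nil_pos num h] at hd
      rcases List.mem_cons.mp hd with rfl | hd'
      · exact ⟨PySem.Int.mod_nonneg num (by omega : (0:Int) < 10), PySem.Int.mod_lt num (by omega : (0:Int) < 10)⟩
      · exact ih _ (hn ▸ pvFloordiv10_toNat_lt num h) _ rfl d hd'
    · rw [digitsLoop_nil_nonpos num h] at hd
      simp at hd

-- reading a slot after setting slot d, with in-range Int indices
lemma pyGetD_pySetD_iff (digits : List Bool) (d e : Int)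
    (hlen : digits.length = 10) (hd0 : 0 ≤ d) (hd1 : d < 10) (he0 : 0 ≤ e) (he1 : e < 10) :
    (PySem.List.pyGetD (PySem.List.pySetD digits d true) e false = false ↔
      (e ≠ d ∧ PySem.List.pyGetD digits e false = false)) := by
  rw [PySem.List.pySetD_of_nonneg digits true hd0,
      PySem.List.pyGetD_of_nonneg _ false he0,
      PySem.List.pyGetD_of_nonneg digits false he0]
  have hdn : d.toNat < digits.length := by omega
  have hen : e.toNat < digits.length := by omega
  rw [List.getD_eq_getElem _ _ (by simpa using hen),
      List.getD_eq_getElem _ _ hen,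
      List.getElem_set]
  by_cases hde : e = d
  · subst hde; simp
  · have : d.toNat ≠ e.toNat := by omega
    simp [this, hde]

-- A's loop returns true iff the remaining digit list has a repeat or hits a marked slot
lemma hrdLoop_eq : ∀ (n : ℕ) (num : Int), num.toNat = n →
    ∀ (digits : List Bool), digits.length = 10 →
    hrdLoop num digits =
      !decide ((digitsLoop num []).Nodup ∧
               ∀ d ∈ digitsLoop num [], PySem.List.pyGetD digits d false = false) := by
  intro n
  induction n using Nat.strong_induction_on with
  | _ n ih =>
    intro num hn digits hlen
    by_cases h : num > 0
    · rw [hrdLoop, digitsLoop_nil_pos num h]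
      simp only [h, dif_pos]
      set d := PySem.Int.mod num 10 with hdd
      set L := digitsLoop (PySem.Int.floordiv num 10) [] with hL
      have hd0 : 0 ≤ d := PySem.Int.mod_nonneg num (by omega : (0:Int) < 10)
      have hd1 : d < 10 := PySem.Int.mod_lt num (by omega : (0:Int) < 10)
      have hbound : ∀ e ∈ L, 0 ≤ e ∧ e < 10 :=
        fun e he => mem_digitsLoop_nil _ _ rfl e he
      by_cases hget : PySem.List.pyGetD digits d false = true
      · simp only [hget, if_true]
        have hnot : ¬ ((d :: L).Nodup ∧
            ∀ e ∈ d :: L, PySem.List.pyGetD digits e false = false) := by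
          rintro ⟨-, hall⟩
          have := hall d (List.mem_cons_self)
          rw [hget] at this
          simp at this
        rw [decide_eq_false hnot]
        rfl
      · have hgetf : PySem.List.pyGetD digits d false = false :=
          Bool.eq_false_iff.mpr hget
        simp only [hget]
        rw [ih _ (hn ▸ pvFloordiv10_toNat_lt num h) _ rfl _
              (by rw [PySem.List.length_pySetD]; exact hlen)]
        refine congrArg (fun b => !b) (decide_eq_decide.mpr ?_)
        constructor
        · rintro ⟨hnd, hall⟩
          have hall' : ∀ e ∈ L, e ≠ d ∧ PySem.List.pyGetD digits e false = false :=
            fun e he =>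
              (pyGetD_pySetD_iff digits d e hlen hd0 hd1
                (hbound e he).1 (hbound e he).2).mp (hall e he)
          refine ⟨List.nodup_cons.mpr ⟨fun hmem => (hall' d hmem).1 rfl, hnd⟩, ?_⟩
          intro e he
          rcases List.mem_cons.mp he with rfl | he'
          · exact hgetf
          · exact (hall' e he').2
        · rintro ⟨hnd, hall⟩
          have hdnot : d ∉ L := (List.nodup_cons.mp hnd).1
          refine ⟨(List.nodup_cons.mp hnd).2, ?_⟩
          intro e he
          exact (pyGetD_pySetD_iff digits d e hlen hd0 hd1
            (hbound e he).1 (hbound e he).2).mpr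
            ⟨fun hed => hdnot (hed ▸ he), hall e (List.mem_cons_of_mem _ he)⟩
    · rw [hrdLoop, digitsLoop_nil_nonpos num h]
      simp [h]

-- every slot of the initial table [False]*10 is unmarked
lemma getD_false_of_all_false (l : List Bool) (hl : ∀ b ∈ l, b = false) (i : ℕ) :
    (l[i]?).getD false = false := by
  cases h : l[i]? with
  | none => rfl
  | some b => simpa using hl b (List.mem_of_getElem? h)

lemma pyGetD_replicate_false (e : Int) :
    PySem.List.pyGetD (List.replicate 10 false) e false = false := by
  simp only [PySem.List.pyGetD, PySem.List.pyGet?, PySem.List.pyIdx?, List.length_replicate]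
  split_ifs <;>
    simp only [Option.bind, Option.getD_none] <;>
    first | rfl | exact getD_false_of_all_false _ (by simp) _

-- B's inner loop computes count + (number of digits of n equal to d)
lemma cntLoop_eq : ∀ (k : ℕ) (n : Int), n.toNat = k → ∀ (d count : Int),
    cntLoop n d count = count + ((digitsLoop n []).count d : Int) := by
  intro k
  induction k using Nat.strong_induction_on with
  | _ k ih =>
    intro n hk d count
    by_cases h : n > 0
    · rw [cntLoop, digitsLoop_nil_pos n h]
      simp only [h, dif_pos]
      rw [ih _ (hk ▸ pvFloordiv10_toNat_lt n h) _ rfl]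
      have hc : List.count d (PySem.Int.mod n 10 :: digitsLoop (PySem.Int.floordiv n 10) [])
          = List.count d (digitsLoop (PySem.Int.floordiv n 10) [])
            + (if PySem.Int.mod n 10 = d then 1 else 0) := by
        by_cases hd : PySem.Int.mod n 10 = d
        · simp [List.count_cons]
        · simp [List.count_cons]
      rw [hc]
      split_ifs <;> push_cast <;> ring
    · rw [cntLoop, digitsLoop_nil_nonpos n h]
      simp [h]

-- B's outer loop returns true iff some listed digit value occurs at least twice
lemma altOuter_eq (num : Int) : ∀ (L : List Int),
    altOuter num L = decide (∃ d ∈ L, 2 ≤ (digitsLoop num []).count d) := by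
  intro L
  induction L with
  | nil => simp [altOuter]
  | cons d ds ih =>
    rw [altOuter, ih, cntLoop_eq _ num rfl d 0]
    by_cases hd : 2 ≤ (digitsLoop num []).count d
    · simp [hd]
    · simp [hd]

-- ===== VERDICT (by name: the statement is the Claim_ definition above) =====
theorem has_repeated_digits_spec : Claim_equal_has_repeated_digits := by
  intro num _hdom
  unfold Spec_has_repeated_digits has_repeated_digits has_repeated_digits_alt
  rw [hrdLoop_eq _ num rfl _ (by simp), altOuter_eq num]
  have hiff : ((digitsLoop num []).Nodup ∧ ∀ d ∈ digitsLoop num [],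
      PySem.List.pyGetD (List.replicate 10 false) d false = false) ↔
      (digitsLoop num []).Nodup :=
    ⟨fun hc => hc.1, fun hc => ⟨hc, fun d _ => pyGetD_replicate_false d⟩⟩
  have hkey : (∃ d ∈ PySem.List.pyRange 0 10 1, 2 ≤ (digitsLoop num []).count d) ↔
      ¬ (digitsLoop num []).Nodup := by
    constructor
    · rintro ⟨d, -, hcnt⟩ hnd
      have := (List.nodup_iff_count_le_one.mp hnd) d
      omega
    · intro hnd
      rcases not_forall.mp (fun hall => hnd (List.nodup_iff_count_le_one.mpr hall))
        with ⟨d, hd⟩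
      have hcnt : 2 ≤ (digitsLoop num []).count d := by omega
      have hmem : d ∈ digitsLoop num [] := List.count_pos_iff.mp (by omega)
      have hbd := mem_digitsLoop_nil _ num rfl d hmem
      exact ⟨d, PySem.List.mem_pyRange_one.mpr ⟨hbd.1, hbd.2⟩, hcnt⟩
  by_cases hnd : (digitsLoop num []).Nodup
  · rw [decide_eq_true (hiff.mpr hnd),
        decide_eq_false (fun hc => (hkey.mp hc) hnd)]
    rfl
  · rw [decide_eq_false (fun hc => hnd (hiff.mp hc)),
        decide_eq_true (hkey.mpr hnd)]
    rfl
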